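-- pv_equiv track=rewrite | github.com/raphey/binary-matrices | matrix_generator.py | num_free_cols
-- ===== SOURCE A (Python) =====
-- def num_free_cols(mat):
--     n = len(mat)
--     count = 0
--     for j in range(0, n):
--         for i in range(0, n):
--             if mat[i][j] == 1:
--                 break
--         else:
--             count += 1
--     return count
-- ===== SOURCE B (Python) =====
-- def num_free_cols(mat):
--     n = len(mat)
--     occupied = set()
--     for i in range(n):
--         for j in range(n):
--             if mat[i][j] == 1:
--                 occupied.add(j)
--     return n - len(occupied)
-- ===== Notes on version B (the rewrite author's own statement) =====
-- stated objective: alternative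
-- what changed: Replaces A's column-major scan with early break and for-else counting by a single row-major pass that accumulates the set of occupied columns and returns n - len(occupied).
-- outside the precondition, e.g. on num_free_cols([[1, 1], [0]]): A returns 0, B raises IndexError
import Mathlib
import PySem

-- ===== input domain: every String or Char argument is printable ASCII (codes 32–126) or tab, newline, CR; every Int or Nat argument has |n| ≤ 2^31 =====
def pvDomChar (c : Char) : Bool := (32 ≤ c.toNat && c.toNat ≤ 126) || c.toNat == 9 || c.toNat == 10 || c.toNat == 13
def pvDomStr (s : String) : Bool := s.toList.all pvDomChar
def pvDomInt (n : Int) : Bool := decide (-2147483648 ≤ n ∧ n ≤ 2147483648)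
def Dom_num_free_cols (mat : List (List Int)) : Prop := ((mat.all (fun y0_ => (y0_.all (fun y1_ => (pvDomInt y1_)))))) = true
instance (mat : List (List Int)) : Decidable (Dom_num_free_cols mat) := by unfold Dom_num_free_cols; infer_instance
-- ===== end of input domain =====

-- B replaces A's column-major scan (early break + for-else counting) by one row-major pass
-- accumulating the set of occupied columns and returning n - len(occupied); same cost, different structure.


-- ===== PORT A =====
-- mat[i][j]: pyGetD with defaults; exact under Pre_ (0 ≤ i,j < n ≤ row lengths, so in range)
def pvCell (mat : List (List Int)) (i j : Int) : Int :=
  PySem.List.pyGetD (PySem.List.pyGetD mat i []) j 0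

-- A's inner 'for i in range(0, n): if mat[i][j] == 1: break / else:' — true = the else-branch fires
def pvA_inner (mat : List (List Int)) (j : Int) : List Int → Bool
  | [] => true
  | i :: is => if pvCell mat i j = 1 then false else pvA_inner mat j is

def num_free_cols (mat : List (List Int)) : Int :=
  let n : Int := mat.length
  (PySem.List.pyRange 0 n 1).foldl
    (fun count j => if pvA_inner mat j (PySem.List.pyRange 0 n 1) then count + 1 else count) 0

-- ===== PORT B =====
-- B's inner 'for j in range(n): if mat[i][j] == 1: occupied.add(j)'
def pvB_row (mat : List (List Int)) (n i : Int) (occ : PySem.Set Int) : PySem.Set Int :=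
  (PySem.List.pyRange 0 n 1).foldl
    (fun occ j => if pvCell mat i j = 1 then PySem.Set.add occ j else occ) occ

def num_free_cols_alt (mat : List (List Int)) : Int :=
  let n : Int := mat.length
  let occ := (PySem.List.pyRange 0 n 1).foldl (fun occ i => pvB_row mat n i occ) PySem.Set.empty
  n - PySem.Set.len occ

-- ===== PRECONDITION & SPEC =====
-- Pre_ requires every row to have at least n = len(mat) entries (in particular all square matrices):
-- on ragged input Python raises IndexError on a short row — except that A's early break can skip the
-- short cells and still return, a value B does not reproduce (see cites).
def Pre_num_free_cols (mat : List (List Int)) : Prop :=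
  ∀ row ∈ mat, mat.length ≤ row.length
instance (mat : List (List Int)) : Decidable (Pre_num_free_cols mat) := by
  unfold Pre_num_free_cols; infer_instance

def pvWitness_num_free_cols : List (List Int) := [[0, 1], [0, 0]]

def Spec_num_free_cols (mat : List (List Int)) (out : Int) : Prop := out = num_free_cols_alt mat
instance (mat : List (List Int)) (out : Int) : Decidable (Spec_num_free_cols mat out) := by unfold Spec_num_free_cols; infer_instance

-- ===== CLAIM (what is proved, stated in full; the proofs are below) =====
def Claim_equal_num_free_cols : Prop := ∀ (mat : List (List Int)), Dom_num_free_cols mat → Pre_num_free_cols mat → Spec_num_free_cols mat (num_free_cols mat)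

-- ===== LEMMAS AND PROOFS =====

-- A's inner loop decides "column j has no 1 in rows of l"
theorem pvA_inner_eq_all (mat : List (List Int)) (j : Int) (l : List Int) :
    pvA_inner mat j l = l.all (fun i => !(pvCell mat i j == 1)) := by
  induction l with
  | nil => rfl
  | cons i is ih =>
    simp only [pvA_inner, ih]
    by_cases h : pvCell mat i j = 1 <;> simp [h]

-- membership in B's inner fold
theorem mem_pvB_row (mat : List (List Int)) (n i : Int) (occ : PySem.Set Int) (x : Int) :
    x ∈ pvB_row mat n i occ ↔ x ∈ occ ∨ (x ∈ PySem.List.pyRange 0 n 1 ∧ pvCell mat i x = 1) := by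
  unfold pvB_row
  generalize PySem.List.pyRange 0 n 1 = l
  induction l generalizing occ with
  | nil => simp
  | cons j js ih =>
    simp only [List.foldl_cons, List.mem_cons, ih]
    split_ifs with h
    · rw [show ∀ s : PySem.Set Int, x ∈ PySem.Set.add s j ↔ x ∈ s ∨ x = j from
        fun s => PySem.Set.mem_add s j x]
      constructor
      · rintro ((hx | rfl) | hx)
        · exact Or.inl hx
        · exact Or.inr ⟨Or.inl rfl, h⟩
        · exact Or.inr ⟨Or.inr hx.1, hx.2⟩
      · rintro (hx | ⟨(rfl | hx), hc⟩)
        · exact Or.inl (Or.inl hx)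
        · exact Or.inl (Or.inr rfl)
        · exact Or.inr ⟨hx, hc⟩
    · constructor
      · rintro (hx | hx)
        · exact Or.inl hx
        · exact Or.inr ⟨Or.inr hx.1, hx.2⟩
      · rintro (hx | ⟨(rfl | hx), hc⟩)
        · exact Or.inl hx
        · exact absurd hc h
        · exact Or.inr ⟨hx, hc⟩

theorem nodup_pvB_row (mat : List (List Int)) (n i : Int) (occ : PySem.Set Int)
    (h : occ.Nodup) : (pvB_row mat n i occ).Nodup := by
  unfold pvB_row
  generalize PySem.List.pyRange 0 n 1 = l
  induction l generalizing occ with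
  | nil => exact h
  | cons j js ih =>
    simp only [List.foldl_cons]
    split_ifs
    · exact ih _ (PySem.Set.nodup_add occ j h)
    · exact ih _ h

-- membership in B's outer fold
theorem mem_pvB_outer (mat : List (List Int)) (n : Int) (l : List Int) (occ : PySem.Set Int) (x : Int) :
    x ∈ l.foldl (fun occ i => pvB_row mat n i occ) occ ↔
      x ∈ occ ∨ (x ∈ PySem.List.pyRange 0 n 1 ∧ ∃ i ∈ l, pvCell mat i x = 1) := by
  induction l generalizing occ with
  | nil => simp
  | cons i is ih =>
    simp only [List.foldl_cons, ih, mem_pvB_row, List.mem_cons]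
    constructor
    · rintro ((hx | ⟨hr, hc⟩) | ⟨hr, i', hi', hc⟩)
      · exact Or.inl hx
      · exact Or.inr ⟨hr, i, Or.inl rfl, hc⟩
      · exact Or.inr ⟨hr, i', Or.inr hi', hc⟩
    · rintro (hx | ⟨hr, i', (rfl | hi'), hc⟩)
      · exact Or.inl (Or.inl hx)
      · exact Or.inl (Or.inr ⟨hr, hc⟩)
      · exact Or.inr ⟨hr, i', hi', hc⟩

theorem nodup_pvB_outer (mat : List (List Int)) (n : Int) (l : List Int) (occ : PySem.Set Int)
    (h : occ.Nodup) : (l.foldl (fun occ i => pvB_row mat n i occ) occ).Nodup := by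
  induction l generalizing occ with
  | nil => exact h
  | cons i is ih => exact ih _ (nodup_pvB_row mat n i occ h)

-- ===== VERDICT (by name: the statement is the Claim_ definition above) =====
theorem num_free_cols_spec : Claim_equal_num_free_cols := by
  intro mat _ _
  unfold Spec_num_free_cols num_free_cols num_free_cols_alt
  show (PySem.List.pyRange 0 (mat.length : Int) 1).foldl
      (fun count j => if pvA_inner mat j (PySem.List.pyRange 0 (mat.length : Int) 1) then count + 1 else count) 0
    = (mat.length : Int) - PySem.Set.len
        ((PySem.List.pyRange 0 (mat.length : Int) 1).foldl
          (fun occ i => pvB_row mat (mat.length : Int) i occ) PySem.Set.empty)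
  set n : Int := (mat.length : Int) with hn
  set R := PySem.List.pyRange 0 n 1 with hR
  set anyOne : Int → Bool := fun j => R.any (fun i => pvCell mat i j == 1) with hany
  -- A's count is countP of the free columns
  have hA : R.foldl (fun count j => if pvA_inner mat j R then count + 1 else count) 0
      = (R.countP (fun j => !anyOne j) : Int) := by
    have := PySem.List.foldl_count_if (fun j => pvA_inner mat j R) R 0
    simp only [this, zero_add]
    congr 1
    apply List.countP_congr
    intro j _
    simp [pvA_inner_eq_all, hany, List.all_eq_not_any_not]
  rw [hA]
  -- B's occupied set has the same length as the filtered range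
  set occ := R.foldl (fun occ i => pvB_row mat n i occ) PySem.Set.empty with hocc
  have hmem : ∀ x, x ∈ occ ↔ x ∈ R.filter anyOne := by
    intro x
    rw [hocc, mem_pvB_outer, List.mem_filter]
    simp only [PySem.Set.empty, List.not_mem_nil, false_or, hany, List.any_eq_true, beq_iff_eq]
    exact Iff.rfl
  have hperm : occ.Perm (R.filter anyOne) :=
    (List.perm_ext_iff_of_nodup
      (nodup_pvB_outer mat n R PySem.Set.empty List.nodup_nil)
      ((PySem.List.nodup_pyRange_one 0 n).filter _)).mpr hmem
  have hlen : PySem.Set.len occ = (R.countP anyOne : Int) := by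
    simp [PySem.Set.len, hperm.length_eq, List.countP_eq_length_filter]
  rw [hlen]
  -- n = countP p + countP !p over R
  have hsplit : R.countP anyOne + R.countP (fun j => !anyOne j) = R.length := by
    simp [List.length_eq_countP_add_countP anyOne]
  have hlenR : (R.length : Int) = n := by
    rw [hR, PySem.List.length_pyRange_one]; omega
  omega
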